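-- pv_equiv track=rewrite | github.com/AnVales/code_signal_arcade | 10 - Eruption of Light/isBeautifulString.py | solution
-- ===== SOURCE A (Python) =====
-- def solution(inputString):
--
--     # List with the alphabet
--     import string
--     alphabet_list = list(string.ascii_lowercase)
--
--     # A list with the frequencies of each letter
--     alphabet_list_freq = [0] * len(alphabet_list)
--
--     for letter in inputString:
--         alphabet_list_freq[alphabet_list.index(letter)] += 1
--
--     # Check if its ordered
--     import copy
--     alphabet_list_freq_sorted = alphabet_list_freq.copy()
--     alphabet_list_freq_sorted.sort(reverse = True)
--
--     return alphabet_list_freq == alphabet_list_freq_sorted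
-- ===== SOURCE B (Python) =====
-- def solution(inputString):
--     # count letter positions in a dict, then decide "beautiful" by a single
--     # non-increasing scan over positions 0..25 (no 26-slot array, no sort)
--     import string
--     counts = {}
--     for letter in inputString:
--         p = string.ascii_lowercase.index(letter)
--         counts[p] = counts.get(p, 0) + 1
--
--     prev = None
--     for i in range(26):
--         c = counts.get(i, 0)
--         if prev is not None and c > prev:
--             return False
--         prev = c
--     return True
-- ===== Notes on version B (the rewrite author's own statement) =====
-- stated objective: alternative
-- what changed: Counts letter positions in a dict instead of an index-addressed 26-slot array, and decides the result by a single non-increasing scan over positions 0..25 with an early return instead of copy + sort(reverse=True) + list equality.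
import Mathlib
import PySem

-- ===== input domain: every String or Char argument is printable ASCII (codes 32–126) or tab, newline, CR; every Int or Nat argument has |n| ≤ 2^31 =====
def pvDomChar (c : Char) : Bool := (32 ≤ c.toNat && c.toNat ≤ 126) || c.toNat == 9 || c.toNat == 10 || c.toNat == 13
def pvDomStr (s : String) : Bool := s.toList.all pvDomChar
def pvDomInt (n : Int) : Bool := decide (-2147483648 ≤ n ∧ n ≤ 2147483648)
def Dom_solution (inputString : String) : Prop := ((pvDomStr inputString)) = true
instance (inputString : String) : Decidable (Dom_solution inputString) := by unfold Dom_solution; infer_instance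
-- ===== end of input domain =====

-- B counts letter positions in a dict (instead of an index-addressed 26-slot array) and
-- decides "beautiful" by a single non-increasing scan over positions 0..25 with an early
-- return, instead of A's copy + sort(reverse=True) + list equality (objective: alternative).


-- ===== PORT A =====
-- string.ascii_lowercase as a list of characters
def pvAlphaA : List Char := "abcdefghijklmnopqrstuvwxyz".toList

-- the counting loop: alphabet_list_freq[alphabet_list.index(letter)] += 1
-- (alphabet_list.index raises ValueError for a non-lowercase character: excluded by Pre_;
--  the total forms pyGetD/pySetD are used only under that precondition)
def pvFreqA (inputString : String) : List Int :=
  inputString.toList.foldl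
    (fun freq letter =>
      let i : Int := (pvAlphaA.idxOf letter : Nat)
      PySem.List.pySetD freq i (PySem.List.pyGetD freq i 0 + 1))
    (List.replicate 26 (0 : Int))

def solution (inputString : String) : Bool :=
  let freq := pvFreqA inputString
  let freqSorted := PySem.List.sorted freq (fun x => x) true
  decide (freq = freqSorted)

-- ===== PORT B =====
-- string.ascii_lowercase, B's copy
def pvAlphaB : List Char := "abcdefghijklmnopqrstuvwxyz".toList

-- p = string.ascii_lowercase.index(letter); counts[p] = counts.get(p, 0) + 1
-- (.index raises ValueError for a non-lowercase character, exactly as in A: excluded by Pre_)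
def pvCountsB (inputString : String) : PySem.Dict Int Int :=
  inputString.toList.foldl
    (fun counts letter =>
      let p : Int := (pvAlphaB.idxOf letter : Nat)
      counts.insert p (counts.getD p 0 + 1))
    PySem.Dict.empty

-- prev = None; for i in range(26): c = counts.get(i, 0);
-- if prev is not None and c > prev: return False; prev = c — then return True
def pvScanB (counts : PySem.Dict Int Int) : List Int → Option Int → Bool
  | [], _ => true
  | i :: rest, prev =>
      let c : Int := counts.getD i 0
      match prev with
      | some p => if c > p then false else pvScanB counts rest (some c)
      | none => pvScanB counts rest (some c)

def solution_alt (inputString : String) : Bool :=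
  pvScanB (pvCountsB inputString) (PySem.List.pyRange 0 26 1) none

-- ===== PRECONDITION & SPEC =====
-- Pre_ excludes exactly the strings containing a character that is not a lowercase
-- ASCII letter, on which both Pythons' .index(letter) raises ValueError.
def Pre_solution (inputString : String) : Prop :=
  (inputString.toList.all (fun c => "abcdefghijklmnopqrstuvwxyz".toList.contains c)) = true
instance (inputString : String) : Decidable (Pre_solution inputString) := by
  unfold Pre_solution; infer_instance

def pvWitness_solution : String := "baab"

def Spec_solution (inputString : String) (out : Bool) : Prop := out = solution_alt inputString
instance (inputString : String) (out : Bool) : Decidable (Spec_solution inputString out) := by unfold Spec_solution; infer_instance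

-- ===== CLAIM (what is proved, stated in full; the proofs are below) =====
def Claim_equal_solution : Prop := ∀ (inputString : String), Dom_solution inputString → Pre_solution inputString → Spec_solution inputString (solution inputString)

-- ===== LEMMAS AND PROOFS =====

-- A's counting step on a list of the shape alpha.map f bumps exactly the letter's slot
theorem pvStepA_map (f : Char → Int) (x : Char) (hx : x ∈ pvAlphaA) :
    (let i : Int := (pvAlphaA.idxOf x : Nat)
     PySem.List.pySetD (pvAlphaA.map f) i (PySem.List.pyGetD (pvAlphaA.map f) i 0 + 1)) =
    pvAlphaA.map (fun ch => if ch = x then f ch + 1 else f ch) := by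
  have hnd : pvAlphaA.Nodup := by decide
  have hidx : pvAlphaA.idxOf x < pvAlphaA.length := List.idxOf_lt_length_of_mem hx
  have hget : PySem.List.pyGetD (pvAlphaA.map f) ((pvAlphaA.idxOf x : Nat) : Int) 0 = f x := by
    rw [PySem.List.pyGetD_natCast]
    rw [List.getD_eq_getElem _ _ (by simpa using hidx)]
    simp [List.getElem_idxOf hidx]
  simp only [hget, PySem.List.pySetD_natCast]
  apply List.ext_getElem
  · simp
  · intro j hj hj'
    simp only [List.getElem_set, List.getElem_map]
    have hjl : j < pvAlphaA.length := by simpa using hj'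
    by_cases h : pvAlphaA.idxOf x = j
    · subst h
      simp [List.getElem_idxOf hidx]
    · have hne : ¬ pvAlphaA[j] = x := by
        intro hc
        apply h
        have hj2 : pvAlphaA.idxOf pvAlphaA[j] = j := List.Nodup.idxOf_getElem hnd j hjl
        rw [hc] at hj2
        exact hj2
      simp [h, hne]

-- the counting fold over a lowercase-only string computes letter counts
theorem pvFreqA_fold (l : List Char) (f : Char → Int) (h : ∀ x ∈ l, x ∈ pvAlphaA) :
    l.foldl
      (fun freq letter =>
        let i : Int := (pvAlphaA.idxOf letter : Nat)
        PySem.List.pySetD freq i (PySem.List.pyGetD freq i 0 + 1))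
      (pvAlphaA.map f) =
    pvAlphaA.map (fun ch => f ch + (l.count ch : Int)) := by
  induction l generalizing f with
  | nil => simp
  | cons x xs ih =>
      simp only [List.foldl_cons]
      rw [pvStepA_map f x (h x (by simp))]
      rw [ih _ (fun y hy => h y (by simp [hy]))]
      apply List.map_congr_left
      intro ch _
      by_cases hcx : ch = x
      · subst hcx
        simp
        omega
      · simp [hcx, Ne.symm hcx]

theorem pvFreqA_eq_counts (s : String) (h : ∀ x ∈ s.toList, x ∈ pvAlphaA) :
    pvFreqA s = pvAlphaA.map (fun ch => (s.toList.count ch : Int)) := by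
  have h0 : List.replicate 26 (0 : Int) = pvAlphaA.map (fun _ => (0 : Int)) := by decide
  unfold pvFreqA
  rw [h0, pvFreqA_fold s.toList (fun _ => 0) h]
  simp

-- "l equals its descending sort" is the same as Pairwise (· ≥ ·)
theorem pvEqSortedRev_iff_pairwise (l : List Int) :
    l = PySem.List.sorted l (fun x => x) true ↔ l.Pairwise (· ≥ ·) := by
  constructor
  · intro h
    have := PySem.List.sorted_pairwise_rev (xs := l) (key := fun x => x)
    rw [← h] at this
    exact this
  · intro h
    exact (PySem.List.sorted_rev_eq_self_of_pairwise _ _ h).symm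

-- counting a letter's position among the mapped positions counts the letter
theorem pvCount_map_idx (l : List Char) (ch : Char) (hch : ch ∈ pvAlphaA)
    (h : ∀ x ∈ l, x ∈ pvAlphaA) :
    (l.map (fun c => ((pvAlphaA.idxOf c : Nat) : Int))).count ((pvAlphaA.idxOf ch : Nat) : Int) =
      l.count ch := by
  induction l with
  | nil => simp
  | cons x xs ih =>
      have hx := h x (by simp)
      have ihh := ih (fun y hy => h y (by simp [hy]))
      by_cases hcx : x = ch
      · subst hcx; simp [ihh]
      · have hidx : ¬ ((pvAlphaA.idxOf x : Nat) : Int) = ((pvAlphaA.idxOf ch : Nat) : Int) := by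
          intro he
          apply hcx
          have he' : pvAlphaA.idxOf x = pvAlphaA.idxOf ch := by exact_mod_cast he
          exact (List.idxOf_inj hx).mp he'
        simp [hcx, hidx, ihh]

-- on a lowercase-only string, B's dict holds at position idxOf ch the count of ch
theorem pvCountsB_getD (s : String) (ch : Char) (hch : ch ∈ pvAlphaA)
    (h : ∀ x ∈ s.toList, x ∈ pvAlphaA) :
    (pvCountsB s).getD ((pvAlphaA.idxOf ch : Nat) : Int) 0 = (s.toList.count ch : Int) := by
  have hnd : pvAlphaA.Nodup := by decide
  unfold pvCountsB
  rw [show (fun (counts : PySem.Dict Int Int) (letter : Char) =>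
        let p : Int := (pvAlphaB.idxOf letter : Nat)
        counts.insert p (counts.getD p 0 + 1)) =
      (fun counts letter =>
        (fun (d : PySem.Dict Int Int) (p : Int) => d.insert p (d.getD p 0 + 1))
          counts ((pvAlphaA.idxOf letter : Nat) : Int)) from rfl]
  rw [← List.foldl_map (f := fun letter => ((pvAlphaA.idxOf letter : Nat) : Int))
        (g := fun (d : PySem.Dict Int Int) (p : Int) => d.insert p (d.getD p 0 + 1))]
  rw [PySem.Dict.getD_foldl_insert_add_one]
  simp only [PySem.Dict.getD_empty, zero_add]
  congr 1
  exact pvCount_map_idx s.toList ch hch h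

-- B's scan with a running previous value is the Chain predicate
theorem pvScanB_some (counts : PySem.Dict Int Int) (l : List Int) (p : Int) :
    pvScanB counts l (some p) = true ↔
      List.IsChain (· ≥ ·) (p :: l.map (fun i => counts.getD i 0)) := by
  induction l generalizing p with
  | nil => simp [pvScanB]
  | cons i rest ih =>
      simp only [pvScanB, List.map_cons, List.isChain_cons_cons]
      by_cases hc : counts.getD i 0 > p
      · simp [hc, show ¬ p ≥ counts.getD i 0 by omega]
      · simp [hc, ih, show p ≥ counts.getD i 0 by omega]

theorem pvScanB_none (counts : PySem.Dict Int Int) (l : List Int) :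
    pvScanB counts l none = true ↔
      List.IsChain (· ≥ ·) (l.map (fun i => counts.getD i 0)) := by
  cases l with
  | nil => simp [pvScanB]
  | cons i rest =>
      simp only [pvScanB, List.map_cons]
      exact pvScanB_some counts rest (counts.getD i 0)

-- range(26) is the alphabet's positions in alphabetical order
theorem pvRange26_eq_map_idx :
    PySem.List.pyRange 0 26 1 = pvAlphaA.map (fun ch => ((pvAlphaA.idxOf ch : Nat) : Int)) := by
  decide

-- ===== VERDICT (by name: the statement is the Claim_ definition above) =====
theorem solution_spec : Claim_equal_solution := by
  intro s _ hpre
  show solution s = solution_alt s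
  have hmem : ∀ x ∈ s.toList, x ∈ pvAlphaA := by
    intro x hx
    have := List.all_eq_true.mp hpre x hx
    simpa [pvAlphaA, List.contains_iff_mem] using this
  unfold solution solution_alt
  rw [pvFreqA_eq_counts s hmem]
  rw [Bool.eq_iff_iff]
  rw [pvScanB_none]
  simp only [decide_eq_true_eq]
  rw [pvEqSortedRev_iff_pairwise]
  rw [← List.isChain_iff_pairwise]
  rw [pvRange26_eq_map_idx, List.map_map]
  have hmap : (pvAlphaA.map ((fun i => (pvCountsB s).getD i 0) ∘
        (fun ch => ((pvAlphaA.idxOf ch : Nat) : Int)))) =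
      pvAlphaA.map (fun ch => ((s.toList.count ch : Nat) : Int)) := by
    apply List.map_congr_left
    intro ch hch
    exact pvCountsB_getD s ch hch hmem
  rw [hmap]
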